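-- pv_equiv track=rewrite | github.com/mlcast-community/mlcast-dataset-BE-RMI-radclim | src/make_empty_zarr.py | build_variable_attributes
-- ===== SOURCE A (Python) =====
-- def build_variable_attributes(variable_name: str) -> dict[str, str]:
--     """
--     Build CF- and project-style metadata for a RADCLIM variable.
--
--     Parameters
--     ----------
--     variable_name
--         Source variable name, e.g. ``rate_qpe_edk`` or ``acrr_qpe_edk_5m``.
--
--     Returns
--     -------
--     dict[str, str]
--         Attribute dictionary for the output Zarr variable.
--         Returns an empty dictionary if the variable naming scheme is unknown.
--     """
--     name = variable_name.lower()
--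
--     if name.startswith("rate_"):
--         quantity = "RATE"
--         units = "kg m-2 h-1"
--         standard_name = "rainfall_flux"
--         base_name = "Rain rate"
--     elif name.startswith("acrr_"):
--         quantity = "ACRR"
--         units = "kg m-2"
--         standard_name = "precipitation_amount"
--         base_name = "Accumulated precipitation amount"
--     else:
--         return {}
--
--     product_code = None
--     product_description = None
--     if "_qpe" in name:
--         product_code = "QPE"
--         product_description = "Quantitative precipitation estimate"
--     elif "_cap" in name:
--         product_code = "CAP"
--         product_description = "CAP (product type)"
--
--     method_code = None
--     method_description = None
--     if "_edk" in name:
--         method_code = "EDK"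
--         method_description = "External drift kriging"
--     elif "_mfb" in name:
--         method_code = "MFB"
--         method_description = "Mean field bias correction"
--
--     accumulation_period = None
--     accumulation_text = None
--     if quantity == "ACRR":
--         if name.endswith("_5m"):
--             accumulation_period = "PT5M"
--             accumulation_text = "5 minutes"
--         elif name.endswith("_1h"):
--             accumulation_period = "PT1H"
--             accumulation_text = "1 hour"
--
--     long_name = base_name
--     if product_code:
--         long_name += f" ({product_code}"
--         if method_code:
--             long_name += f"_{method_code}"
--         long_name += ")"
--     elif method_code:
--         long_name += f" ({method_code})"
--
--     if accumulation_text: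
--         long_name += f" over {accumulation_text}"
--
--     attrs = {
--         "long_name": long_name,
--         "units": units,
--         "standard_name": standard_name,
--         "quantity": quantity,
--         "product": product_code,
--         "product_description": product_description,
--         "method": method_code,
--         "method_description": method_description,
--     }
--
--     if accumulation_period:
--         attrs["accumulation_period"] = accumulation_period
--
--     return {key: value for key, value in attrs.items() if value is not None}
-- ===== SOURCE B (Python) =====
-- # Exhaustive precomputation: all 36 possible attribute dicts are built once at
-- # module load, keyed by a feature tuple; each call only classifies the name and
-- # does a single table lookup (no per-call string assembly or None-filtering).
--
-- def _make_table():
--     table = {}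
--     prefixes = [("rate", "RATE", "kg m-2 h-1", "rainfall_flux", "Rain rate"),
--                 ("acrr", "ACRR", "kg m-2", "precipitation_amount",
--                  "Accumulated precipitation amount")]
--     products = [None, ("QPE", "Quantitative precipitation estimate"),
--                 ("CAP", "CAP (product type)")]
--     methods = [None, ("EDK", "External drift kriging"),
--                ("MFB", "Mean field bias correction")]
--     accums = [None, ("PT5M", "5 minutes"), ("PT1H", "1 hour")]
--     for pfx, quantity, units, std, base in prefixes:
--         for pi, prod in enumerate(products):
--             for mi, meth in enumerate(methods):
--                 accs = accums if quantity == "ACRR" else [None]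
--                 for ai, acc in enumerate(accs):
--                     ln = base
--                     if prod:
--                         ln += " (" + prod[0] + ("_" + meth[0] if meth else "") + ")"
--                     elif meth:
--                         ln += " (" + meth[0] + ")"
--                     if acc:
--                         ln += " over " + acc[1]
--                     attrs = {"long_name": ln, "units": units,
--                              "standard_name": std, "quantity": quantity}
--                     if prod:
--                         attrs["product"], attrs["product_description"] = prod
--                     if meth:
--                         attrs["method"], attrs["method_description"] = meth
--                     if acc:
--                         attrs["accumulation_period"] = acc[0]
--                     table[(pfx, pi, mi, ai)] = attrs
--     return table
--
--
-- _TABLE = _make_table()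
--
--
-- def build_variable_attributes(variable_name: str) -> dict[str, str]:
--     name = variable_name.lower()
--     if name.startswith("rate_"):
--         pfx = "rate"
--     elif name.startswith("acrr_"):
--         pfx = "acrr"
--     else:
--         return {}
--     pi = 1 if "_qpe" in name else 2 if "_cap" in name else 0
--     mi = 1 if "_edk" in name else 2 if "_mfb" in name else 0
--     ai = 0
--     if pfx == "acrr":
--         ai = 1 if name.endswith("_5m") else 2 if name.endswith("_1h") else 0
--     return dict(_TABLE[(pfx, pi, mi, ai)])
-- ===== Notes on version B (the rewrite author's own statement) =====
-- stated objective: alternative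
-- what changed: B precomputes at module load an exhaustive table of all 36 possible attribute dicts (every prefix x product x method x accumulation combination), so each call only classifies the name into a feature tuple and returns a single dict lookup, instead of A's per-call string assembly and None-filtering.
import Mathlib
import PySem

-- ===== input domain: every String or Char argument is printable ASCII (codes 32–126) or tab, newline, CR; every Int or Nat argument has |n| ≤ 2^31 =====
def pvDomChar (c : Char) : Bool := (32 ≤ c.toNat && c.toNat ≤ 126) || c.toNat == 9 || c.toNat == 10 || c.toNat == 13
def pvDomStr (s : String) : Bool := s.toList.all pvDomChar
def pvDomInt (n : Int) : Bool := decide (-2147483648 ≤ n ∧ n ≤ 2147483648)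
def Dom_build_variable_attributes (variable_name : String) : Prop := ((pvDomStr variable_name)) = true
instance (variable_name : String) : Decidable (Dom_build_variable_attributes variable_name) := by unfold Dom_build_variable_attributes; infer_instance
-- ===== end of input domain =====

-- B precomputes all 36 possible attribute dicts once (exhaustive enumeration keyed by a feature
-- tuple) and per call only classifies the name and does one table lookup; same values everywhere.

-- ===== PORT A =====
-- tail of A after the prefix if/elif chain (straight-line Python code, parameterised by the
-- four values the chain set); Python truthiness `if product_code:` is an Option match here
-- (exact: the codes are non-empty string literals or None).
def pvBuildA (name quantity units standard_name base_name : String) : List (String × String) :=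
  let prod : Option String × Option String :=
    if PySem.Str.isIn "_qpe" name then (some "QPE", some "Quantitative precipitation estimate")
    else if PySem.Str.isIn "_cap" name then (some "CAP", some "CAP (product type)")
    else (none, none)
  let meth : Option String × Option String :=
    if PySem.Str.isIn "_edk" name then (some "EDK", some "External drift kriging")
    else if PySem.Str.isIn "_mfb" name then (some "MFB", some "Mean field bias correction")
    else (none, none)
  let acc : Option String × Option String :=
    if quantity == "ACRR" then
      if PySem.Str.endswith name "_5m" then (some "PT5M", some "5 minutes")
      else if PySem.Str.endswith name "_1h" then (some "PT1H", some "1 hour")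
      else (none, none)
    else (none, none)
  let long_name := base_name
  let long_name :=
    match prod.1 with
    | some pc =>
        let l := long_name ++ (" (" ++ pc)
        let l := match meth.1 with | some mc => l ++ ("_" ++ mc) | none => l
        l ++ ")"
    | none =>
        match meth.1 with
        | some mc => long_name ++ (" (" ++ mc ++ ")")
        | none => long_name
  let long_name := match acc.2 with | some t => long_name ++ (" over " ++ t) | none => long_name
  let attrs : PySem.Dict String (Option String) := PySem.Dict.ofList
    [("long_name", some long_name), ("units", some units),
     ("standard_name", some standard_name), ("quantity", some quantity),
     ("product", prod.1), ("product_description", prod.2),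
     ("method", meth.1), ("method_description", meth.2)]
  let attrs := match acc.1 with
    | some p => attrs.insert "accumulation_period" (some p)
    | none => attrs
  -- {key: value for key, value in attrs.items() if value is not None}
  attrs.items.filterMap (fun kv => kv.2.map (fun v => (kv.1, v)))

def build_variable_attributes (variable_name : String) : List (String × String) :=
  let name := PySem.Str.lower variable_name
  if PySem.Str.startswith name "rate_" then
    pvBuildA name "RATE" "kg m-2 h-1" "rainfall_flux" "Rain rate"
  else if PySem.Str.startswith name "acrr_" then
    pvBuildA name "ACRR" "kg m-2" "precipitation_amount" "Accumulated precipitation amount"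
  else []

-- ===== PORT B =====
def pvPrefixes : List (String × String × String × String × String) :=
  [("rate", "RATE", "kg m-2 h-1", "rainfall_flux", "Rain rate"),
   ("acrr", "ACRR", "kg m-2", "precipitation_amount", "Accumulated precipitation amount")]

def pvProducts : List (Option (String × String)) :=
  [none, some ("QPE", "Quantitative precipitation estimate"), some ("CAP", "CAP (product type)")]

def pvMethods : List (Option (String × String)) :=
  [none, some ("EDK", "External drift kriging"), some ("MFB", "Mean field bias correction")]

def pvAccums : List (Option (String × String)) :=
  [none, some ("PT5M", "5 minutes"), some ("PT1H", "1 hour")]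

-- _make_table(): nested loops over the config lists, one dict entry per combination
def pvMakeTable : PySem.Dict (String × Int × Int × Int) (List (String × String)) :=
  PySem.Dict.ofList
    (pvPrefixes.flatMap (fun p =>
      match p with
      | (pfx, quantity, units, std, base) =>
        (PySem.List.enumerate pvProducts 0).flatMap (fun pe =>
          (PySem.List.enumerate pvMethods 0).flatMap (fun me =>
            let accs := if quantity == "ACRR" then pvAccums else [none]
            (PySem.List.enumerate accs 0).map (fun ae =>
              let prod := pe.2; let meth := me.2; let acc := ae.2
              let ln := base
              let ln := match prod with
                | some pr => ln ++ " (" ++ pr.1 ++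
                    (match meth with | some m => "_" ++ m.1 | none => "") ++ ")"
                | none => match meth with | some m => ln ++ " (" ++ m.1 ++ ")" | none => ln
              let ln := match acc with | some a => ln ++ " over " ++ a.2 | none => ln
              let attrs := [("long_name", ln), ("units", units),
                            ("standard_name", std), ("quantity", quantity)]
                ++ (match prod with
                    | some pr => [("product", pr.1), ("product_description", pr.2)]
                    | none => [])
                ++ (match meth with
                    | some m => [("method", m.1), ("method_description", m.2)]
                    | none => [])
                ++ (match acc with
                    | some a => [("accumulation_period", a.1)]
                    | none => [])
              ((pfx, pe.1, me.1, ae.1), attrs))))))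

def build_variable_attributes_alt (variable_name : String) : List (String × String) :=
  let name := PySem.Str.lower variable_name
  let pfx? : Option String :=
    if PySem.Str.startswith name "rate_" then some "rate"
    else if PySem.Str.startswith name "acrr_" then some "acrr"
    else none
  match pfx? with
  | none => []
  | some pfx =>
    let pi : Int := if PySem.Str.isIn "_qpe" name then 1
                    else if PySem.Str.isIn "_cap" name then 2 else 0
    let mi : Int := if PySem.Str.isIn "_edk" name then 1
                    else if PySem.Str.isIn "_mfb" name then 2 else 0
    let ai : Int := if pfx == "acrr" then
                      (if PySem.Str.endswith name "_5m" then 1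
                       else if PySem.Str.endswith name "_1h" then 2 else 0)
                    else 0
    -- _TABLE[(pfx, pi, mi, ai)]: every reachable key is in the table, so get? is some;
    -- getD [] only totalises the unreachable none branch (Python KeyError cannot occur)
    (pvMakeTable.get? (pfx, pi, mi, ai)).getD []

-- ===== PRECONDITION & SPEC =====
def Spec_build_variable_attributes (variable_name : String) (out : List (String × String)) : Prop := out = build_variable_attributes_alt variable_name
instance (variable_name : String) (out : List (String × String)) : Decidable (Spec_build_variable_attributes variable_name out) := by unfold Spec_build_variable_attributes; infer_instance

-- ===== CLAIM (what is proved, stated in full; the proofs are below) =====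
def Claim_equal_build_variable_attributes : Prop := ∀ (variable_name : String), Dom_build_variable_attributes variable_name → Spec_build_variable_attributes variable_name (build_variable_attributes variable_name)

-- ===== LEMMAS AND PROOFS =====

-- ===== VERDICT (by name: the statement is the Claim_ definition above) =====
set_option maxRecDepth 4000 in
theorem build_variable_attributes_spec : Claim_equal_build_variable_attributes := by
  unfold Claim_equal_build_variable_attributes
  intro v _
  unfold Spec_build_variable_attributes build_variable_attributes build_variable_attributes_alt
    pvBuildA pvMakeTable pvPrefixes pvProducts pvMethods pvAccums
  dsimp only
  generalize PySem.Str.lower v = name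
  generalize PySem.Str.startswith name "rate_" = b1
  generalize PySem.Str.startswith name "acrr_" = b2
  generalize PySem.Str.isIn "_qpe" name = b3
  generalize PySem.Str.isIn "_cap" name = b4
  generalize PySem.Str.isIn "_edk" name = b5
  generalize PySem.Str.isIn "_mfb" name = b6
  generalize PySem.Str.endswith name "_5m" = b7
  generalize PySem.Str.endswith name "_1h" = b8
  clear name
  revert b1 b2 b3 b4 b5 b6 b7 b8
  decide
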